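-- pv_equiv track=rewrite | github.com/dvlab-research/Jenga | jenga_hyvideo_multigpu.py | shift_hilbert_mapping
-- ===== SOURCE A (Python) =====
-- def shift_hilbert_mapping(linear_to_hilbert, hilbert_to_linear, shift_size):
--     """
--     Shifts the first `shift_size` tokens in hilbert order to the end
--
--     Parameters:
--         linear_to_hilbert: Original linear to hilbert mapping
--         hilbert_to_linear: Original hilbert to linear mapping
--         shift_size: Number of tokens to shift
--
--     Returns:
--         shifted_linear_to_hilbert: New linear to hilbert mapping with shift
--         shifted_hilbert_to_linear: New hilbert to linear mapping with shift
--     """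
--     total_size = len(linear_to_hilbert)
--     if shift_size >= total_size:
--         raise ValueError(f"shift_size ({shift_size}) must be less than total size ({total_size})")
--
--     # Create new mappings
--     shifted_linear_to_hilbert = [0] * total_size
--     shifted_hilbert_to_linear = [0] * total_size
--
--     # For each position in the hilbert order
--     for old_hilbert_idx in range(total_size):
--         # Calculate new hilbert index after shift
--         if old_hilbert_idx < shift_size:
--             # First shift_size tokens go to the end
--             new_hilbert_idx = total_size - shift_size + old_hilbert_idx
--         else:
--             # Other tokens move up by shift_size positions
--             new_hilbert_idx = old_hilbert_idx - shift_size
--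
--         # Get the linear index that corresponds to the old hilbert index
--         linear_idx = hilbert_to_linear[old_hilbert_idx]
--
--         # Update both mappings
--         shifted_linear_to_hilbert[linear_idx] = new_hilbert_idx
--         shifted_hilbert_to_linear[new_hilbert_idx] = linear_idx
--
--     return shifted_linear_to_hilbert, shifted_hilbert_to_linear
-- ===== SOURCE B (Python) =====
-- def shift_hilbert_mapping(linear_to_hilbert, hilbert_to_linear, shift_size):
--     """Left-rotate the hilbert order by shift_size: the rotated
--     hilbert-to-linear mapping is a slice rotation, and the rotated position
--     of each hilbert index is plain modular arithmetic."""
--     total_size = len(linear_to_hilbert)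
--     if shift_size >= total_size:
--         raise ValueError(f"shift_size ({shift_size}) must be less than total size ({total_size})")
--
--     # The total_size entries in hilbert order, rotated: a slice rotation.
--     shifted_hilbert_to_linear = (hilbert_to_linear[shift_size:total_size]
--                                  + hilbert_to_linear[:shift_size])
--
--     # Invert: each linear index sits at its old hilbert position minus the shift, mod n.
--     shifted_linear_to_hilbert = [0] * total_size
--     for old_idx, linear_idx in enumerate(hilbert_to_linear[:total_size]):
--         shifted_linear_to_hilbert[linear_idx] = (old_idx - shift_size) % total_size
--
--     return shifted_linear_to_hilbert, shifted_hilbert_to_linear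
-- ===== Notes on version B (the rewrite author's own statement) =====
-- stated objective: simpler
-- what changed: Instead of A's single loop that branch-computes each shifted index and scatter-writes both mappings cell by cell, B obtains the new hilbert-to-linear mapping directly as a slice rotation and fills the inverse mapping in one enumeration pass using modular arithmetic (old_idx - shift_size) % total_size.
-- outside the precondition, e.g. on shift_hilbert_mapping([], [2, 9, -8, -8], -2): A returns ([], []), B returns ([], [2, 9])
import Mathlib
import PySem

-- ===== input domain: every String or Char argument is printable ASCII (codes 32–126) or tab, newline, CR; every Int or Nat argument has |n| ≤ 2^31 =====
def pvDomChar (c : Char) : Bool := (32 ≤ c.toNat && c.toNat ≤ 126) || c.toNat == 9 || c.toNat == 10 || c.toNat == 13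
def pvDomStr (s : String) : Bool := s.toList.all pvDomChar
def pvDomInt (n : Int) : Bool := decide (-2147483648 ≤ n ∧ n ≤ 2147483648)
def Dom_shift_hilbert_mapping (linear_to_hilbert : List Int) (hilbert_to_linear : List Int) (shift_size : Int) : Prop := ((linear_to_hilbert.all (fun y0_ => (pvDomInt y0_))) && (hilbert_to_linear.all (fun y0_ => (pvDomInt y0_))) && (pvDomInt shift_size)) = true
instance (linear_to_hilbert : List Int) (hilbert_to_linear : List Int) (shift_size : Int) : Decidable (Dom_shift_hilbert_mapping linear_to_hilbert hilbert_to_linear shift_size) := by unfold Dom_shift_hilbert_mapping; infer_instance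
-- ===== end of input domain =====

-- B builds the rotated hilbert-to-linear mapping by a slice rotation and inverts it with
-- modular arithmetic in one enumeration pass, instead of A's branch-and-scatter loop (simpler).

-- Python list assignment index normalisation: effective cell of xs[i] = v.
def normC (n : Nat) (i : Int) : Nat := if 0 ≤ i then i.toNat else (i + (n : Int)).toNat

-- Python `xs[i] = v`; exact for -len(xs) ≤ i < len(xs) (guaranteed by Pre_);
-- outside that range Python raises IndexError (such inputs are excluded by Pre_).
def pySetI (xs : List Int) (i : Int) (v : Int) : List Int := xs.set (normC xs.length i) v

-- ===== PORT A =====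
def shift_hilbert_mapping (linear_to_hilbert : List Int) (hilbert_to_linear : List Int) (shift_size : Int) : List Int × List Int :=
  let total : Int := linear_to_hilbert.length
  if shift_size ≥ total then ([], [])  -- Python: raise ValueError (excluded by Pre_)
  else
    -- for old_hilbert_idx in range(total_size): update both mappings in place
    (List.range linear_to_hilbert.length).foldl
      (fun st (old : Nat) =>
        let new : Int := if (old : Int) < shift_size then total - shift_size + (old : Int) else (old : Int) - shift_size
        let lin : Int := hilbert_to_linear.getD old 0  -- hilbert_to_linear[old]; exact since Pre_ gives old < len
        (pySetI st.1 lin new, pySetI st.2 new lin))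
      (List.replicate linear_to_hilbert.length 0, List.replicate linear_to_hilbert.length 0)

-- ===== PORT B =====
def shift_hilbert_mapping_alt (linear_to_hilbert : List Int) (hilbert_to_linear : List Int) (shift_size : Int) : List Int × List Int :=
  let total : Int := linear_to_hilbert.length
  if shift_size ≥ total then ([], [])  -- Python: raise ValueError (excluded by Pre_)
  else
    -- hilbert_to_linear[shift_size:total_size] + hilbert_to_linear[:shift_size]
    let shifted := PySem.List.slice hilbert_to_linear (some shift_size) (some total)
                    ++ PySem.List.slice hilbert_to_linear none (some shift_size)
    -- for old_idx, linear_idx in enumerate(hilbert_to_linear[:total_size]): ... = (old_idx - shift_size) % total_size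
    let out := (PySem.List.enumerate (PySem.List.slice hilbert_to_linear none (some total))).foldl
                 (fun acc p => pySetI acc p.2 (PySem.Int.mod (p.1 - shift_size) total))
                 (List.replicate linear_to_hilbert.length 0)
    (out, shifted)

-- ===== PRECONDITION & SPEC =====
-- Pre_ excludes exactly the inputs on which Python A raises (shift_size ≥ n: ValueError;
-- shift_size < 0 with n ≥ 1, fewer than n hilbert entries, or one of the first n entries
-- outside [-n, n): IndexError), plus the single degenerate family linear_to_hilbert = []
-- with shift_size < 0, where A returns ([], []) without reading hilbert_to_linear at all
-- while B's negative slice rotation naturally sees it.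
def Pre_shift_hilbert_mapping (linear_to_hilbert : List Int) (hilbert_to_linear : List Int) (shift_size : Int) : Prop :=
  0 ≤ shift_size ∧ shift_size < (linear_to_hilbert.length : Int) ∧
  linear_to_hilbert.length ≤ hilbert_to_linear.length ∧
  (∀ e ∈ hilbert_to_linear.take linear_to_hilbert.length,
    -(linear_to_hilbert.length : Int) ≤ e ∧ e < (linear_to_hilbert.length : Int))
instance (linear_to_hilbert : List Int) (hilbert_to_linear : List Int) (shift_size : Int) : Decidable (Pre_shift_hilbert_mapping linear_to_hilbert hilbert_to_linear shift_size) := by unfold Pre_shift_hilbert_mapping; infer_instance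

def pvWitness_shift_hilbert_mapping : List Int × List Int × Int := ([0, 0, 0], [2, 0, 1], 1)

def Spec_shift_hilbert_mapping (linear_to_hilbert : List Int) (hilbert_to_linear : List Int) (shift_size : Int) (out : List Int × List Int) : Prop := out = shift_hilbert_mapping_alt linear_to_hilbert hilbert_to_linear shift_size
instance (linear_to_hilbert : List Int) (hilbert_to_linear : List Int) (shift_size : Int) (out : List Int × List Int) : Decidable (Spec_shift_hilbert_mapping linear_to_hilbert hilbert_to_linear shift_size out) := by unfold Spec_shift_hilbert_mapping; infer_instance

-- ===== CLAIM (what is proved, stated in full; the proofs are below) =====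
def Claim_equal_shift_hilbert_mapping : Prop := ∀ (linear_to_hilbert : List Int) (hilbert_to_linear : List Int) (shift_size : Int), Dom_shift_hilbert_mapping linear_to_hilbert hilbert_to_linear shift_size → Pre_shift_hilbert_mapping linear_to_hilbert hilbert_to_linear shift_size → Spec_shift_hilbert_mapping linear_to_hilbert hilbert_to_linear shift_size (shift_hilbert_mapping linear_to_hilbert hilbert_to_linear shift_size)

-- ===== LEMMAS AND PROOFS =====

-- the rotation of hilbert positions performed by A, and its inverse
def rotF (n s old : Nat) : Nat := if old < s then n - s + old else old - s
def gF (n s new : Nat) : Nat := if new < n - s then new + s else new + s - n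

lemma rot_gF {n s : Nat} (hsn : s < n) {new : Nat} (h : new < n) : rotF n s (gF n s new) = new := by
  unfold rotF gF; split_ifs <;> omega

lemma gF_lt {n s : Nat} (hsn : s < n) {new : Nat} (h : new < n) : gF n s new < n := by
  unfold gF; split_ifs <;> omega

lemma gF_rot {n s : Nat} (hsn : s < n) {old : Nat} (h : old < n) : gF n s (rotF n s old) = old := by
  unfold rotF gF; split_ifs <;> omega

lemma map_gF_perm {n s : Nat} (hsn : s < n) : ((List.range n).map (gF n s)).Perm (List.range n) := by
  apply List.perm_of_nodup_nodup_toFinset_eq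
  · refine List.Nodup.map_on ?_ List.nodup_range
    intro x hx y hy hxy
    simp only [List.mem_range] at hx hy
    unfold gF at hxy; split_ifs at hxy <;> omega
  · exact List.nodup_range
  · ext j
    simp only [List.mem_toFinset, List.mem_map, List.mem_range]
    constructor
    · rintro ⟨x, hx, rfl⟩; exact gF_lt hsn hx
    · intro hj; exact ⟨rotF n s j, by unfold rotF; split_ifs <;> omega, gF_rot hsn hj⟩

-- fold congruence under an invariant on the accumulator
lemma foldl_inv_congr {α β : Type} (P : β → Prop) (f g : β → α → β)
    (h : ∀ x a, P x → f x a = g x a ∧ P (g x a)) :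
    ∀ (l : List α) (b : β), P b → l.foldl f b = l.foldl g b := by
  intro l
  induction l with
  | nil => intro b _; rfl
  | cons a t ih =>
    intro b hb
    obtain ⟨he, hp⟩ := h b a hb
    simp only [List.foldl_cons, he]
    exact ih _ hp

-- reindexing a sequence of writes with position-injective cells by a permutation of range n
lemma foldl_set_perm (n : Nat) (σ c : Nat → Nat) (v : Nat → Int)
    (hperm : ((List.range n).map σ).Perm (List.range n))
    (hc : ∀ x < n, ∀ y < n, c x = c y → x = y) (init : List Int) :
    (List.range n).foldl (fun st old => st.set (c old) (v old)) init
      = (List.range n).foldl (fun st new => st.set (c (σ new)) (v (σ new))) init := by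
  have hcomm : ∀ x ∈ List.range n, ∀ y ∈ List.range n, ∀ (z : List Int),
      (z.set (c x) (v x)).set (c y) (v y) = (z.set (c y) (v y)).set (c x) (v x) := by
    intro x hx y hy z
    by_cases hxy : c x = c y
    · have := hc x (List.mem_range.mp hx) y (List.mem_range.mp hy) hxy
      subst this; rfl
    · exact List.set_comm _ _ hxy
  have h1 := List.Perm.foldl_eq' (f := fun st old => st.set (c old) (v old)) hperm.symm hcomm init
  rw [h1, List.foldl_map]

-- enumerate(xs) as a map over range(len(xs))
lemma enumerate_eq_map_range' (xs : List Int) :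
    ∀ (k : Int), PySem.List.enumerate xs k
      = (List.range xs.length).map (fun (i : Nat) => (k + (i : Int), xs.getD i 0)) := by
  induction xs with
  | nil => intro k; rfl
  | cons x t ih =>
    intro k
    show (k, x) :: PySem.List.enumerate t (k + 1) = _
    rw [ih (k + 1), List.length_cons, List.range_succ_eq_map, List.map_cons, List.map_map]
    refine congrArg₂ _ (by simp) (List.map_congr_left ?_)
    intro i _
    simp only [Function.comp_apply, List.getD_cons_succ]
    refine congrArg₂ _ (by push_cast; ring) rfl

lemma enumerate_eq_map_range (xs : List Int) :
    PySem.List.enumerate xs = (List.range xs.length).map (fun (i : Nat) => ((i : Int), xs.getD i 0)) := by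
  rw [enumerate_eq_map_range' xs 0]
  exact List.map_congr_left (by intro i _; simp)

-- writing xs[i] into cell i for i = 0..m-1 rebuilds the prefix of xs
lemma foldl_set_range_eq (xs : List Int) :
    ∀ (m : Nat), m ≤ xs.length → ∀ (init : List Int), init.length = xs.length →
    (List.range m).foldl (fun st i => st.set i (xs.getD i 0)) init = xs.take m ++ init.drop m := by
  intro m
  induction m with
  | zero => intro _ init _; simp
  | succ m ih =>
    intro hm init hinit
    have hmlt : m < xs.length := by omega
    have hminit : m < init.length := by omega
    rw [List.range_succ, List.foldl_append, ih (by omega) init hinit]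
    simp only [List.foldl_cons, List.foldl_nil]
    rw [List.set_append_right _ _ (by simp)]
    have hlt : (List.take m xs).length = m := by simp; omega
    rw [hlt, Nat.sub_self, List.drop_eq_getElem_cons hminit, List.set_cons_zero,
      List.getD_eq_getElem xs 0 hmlt]
    have ht : List.take (m + 1) xs = List.take m xs ++ [xs[m]] := by
      rw [List.take_add_one, List.getElem?_eq_getElem hmlt]; rfl
    rw [ht, List.append_assoc]; rfl

-- the rotated list, read at position new, is hilbert_to_linear read at gF n s new
lemma shifted_getD (h2l : List Int) (n s : Nat) (hlen : n ≤ h2l.length) (hsn : s < n)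
    (new : Nat) (hnew : new < n) :
    ((h2l.drop s).take (n - s) ++ h2l.take s).getD new 0 = h2l.getD (gF n s new) 0 := by
  have hdlen : ((h2l.drop s).take (n - s)).length = n - s := by simp; omega
  have hglt : gF n s new < h2l.length := by
    have := gF_lt hsn hnew; omega
  have hlen2 : new < ((h2l.drop s).take (n - s) ++ h2l.take s).length := by simp; omega
  rw [List.getD_eq_getElem _ 0 hlen2, List.getD_eq_getElem _ 0 hglt, List.getElem_append]
  by_cases hc : new < n - s
  · rw [dif_pos (by omega)]
    rw [List.getElem_take, List.getElem_drop]
    have he : gF n s new = s + new := by unfold gF; rw [if_pos (by omega)]; omega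
    exact (getElem_congr rfl he (by omega)).symm
  · rw [dif_neg (by omega)]
    rw [List.getElem_take]
    have he : gF n s new = new - ((h2l.drop s).take (n - s)).length := by
      rw [hdlen]; unfold gF; rw [if_neg (by omega)]; omega
    exact (getElem_congr rfl he (by omega)).symm

theorem shift_hilbert_mapping_spec : Claim_equal_shift_hilbert_mapping := by
  intro l2h h2l shift _ hpre
  obtain ⟨h0, h1, hlen, hrange⟩ := hpre
  unfold Spec_shift_hilbert_mapping shift_hilbert_mapping shift_hilbert_mapping_alt
  simp only []
  rw [if_neg (by omega), if_neg (by omega),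
    PySem.List.slice_toNat h2l h0 (by positivity),
    PySem.List.slice_to h2l (by positivity : (0:Int) ≤ (l2h.length : Int)),
    PySem.List.slice_to h2l h0]
  simp only [Int.toNat_natCast]
  set n := l2h.length with hn
  set s := shift.toNat with hsdef
  have hsn : s < n := by omega
  set shifted : List Int := (h2l.drop s).take (n - s) ++ h2l.take s with hshifted
  have hshlen : shifted.length = n := by simp [hshifted]; omega
  set init : List Int := List.replicate n (0 : Int) with hinit
  have hinitlen : init.length = n := by simp [hinit]
  have hrot : ∀ old, old < n →
      (if (old : Int) < shift then (n : Int) - shift + (old : Int) else (old : Int) - shift)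
        = ((rotF n s old : Nat) : Int) := by
    intro old h; unfold rotF; split_ifs <;> omega
  -- ==== component 1: both sides write (old - shift) mod n at hilbert_to_linear[old], in the same order ====
  have hB1 : (PySem.List.enumerate (h2l.take n)).foldl
        (fun acc p => pySetI acc p.2 (PySem.Int.mod (p.1 - shift) (n : Int))) init
      = (List.range n).foldl
        (fun st (old : Nat) => pySetI st (h2l.getD old 0)
          (if (old : Int) < shift then (n : Int) - shift + (old : Int) else (old : Int) - shift)) init := by
    rw [enumerate_eq_map_range, List.foldl_map]
    have hlentake : (h2l.take n).length = n := by simp; omega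
    rw [hlentake]
    refine PySem.List.foldl_congr_mem (List.range n) _ _ init ?_
    intro acc x hx
    have hx' : x < n := List.mem_range.mp hx
    have hg : (h2l.take n).getD x 0 = h2l.getD x 0 := by
      rw [List.getD_eq_getElem _ 0 (by omega), List.getD_eq_getElem _ 0 (by omega),
        List.getElem_take]
    rw [hg, hrot x hx', PySem.Int.mod_eq_emod_of_pos (by omega)]
    have hmod : ((x : Int) - shift) % (n : Int) = ((rotF n s x : Nat) : Int) := by
      unfold rotF
      split_ifs with hcase
      · rw [show ((x : Int) - shift) = ((x : Int) - shift + (n : Int)) - (n : Int) from by ring,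
          Int.sub_emod_right, Int.emod_eq_of_lt (by omega) (by omega)]
        omega
      · rw [Int.emod_eq_of_lt (by omega) (by omega)]
        omega
    rw [hmod]
  -- ==== component 2 of A: the scatter writes rebuild the rotated list ====
  have hA2 :
      (List.range n).foldl
        (fun st (old : Nat) => pySetI st
          (if (old : Int) < shift then (n : Int) - shift + (old : Int) else (old : Int) - shift)
          (h2l.getD old 0)) init
        = shifted := by
    refine Eq.trans (foldl_inv_congr (fun st => st.length = n) _
      (fun st (old : Nat) => st.set (normC n
          (if (old : Int) < shift then (n : Int) - shift + (old : Int) else (old : Int) - shift))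
        (h2l.getD old 0))
      (by
        intro x a hx
        constructor
        · simp only [pySetI, hx]
        · simp [hx]) (List.range n) init hinitlen) ?_
    refine Eq.trans (PySem.List.foldl_congr_mem (List.range n) _
      (fun st (old : Nat) => st.set (rotF n s old) (h2l.getD old 0)) init
      (by
        intro acc x hx
        rw [hrot x (List.mem_range.mp hx)]
        simp [normC])) ?_
    refine Eq.trans (foldl_set_perm n (gF n s) (rotF n s) (fun old => h2l.getD old 0)
      (map_gF_perm hsn)
      (by intro x hx y hy hxy; unfold rotF at hxy; split_ifs at hxy <;> omega) init) ?_
    refine Eq.trans (PySem.List.foldl_congr_mem (List.range n) _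
      (fun st new => st.set new (shifted.getD new 0)) init
      (by
        intro acc x hx
        have hx' : x < n := List.mem_range.mp hx
        rw [rot_gF hsn hx', ← shifted_getD h2l n s (by omega) hsn x hx'])) ?_
    have := foldl_set_range_eq shifted n (by omega) init (by omega)
    rw [this, List.drop_of_length_le (by omega), List.take_of_length_le (by omega),
      List.append_nil]
  -- assemble the pair equality
  refine Eq.trans (PySem.List.foldl_prod_mk
    (fun st (old : Nat) => pySetI st (h2l.getD old 0)
      (if (old : Int) < shift then (n : Int) - shift + (old : Int) else (old : Int) - shift))
    (fun st (old : Nat) => pySetI st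
      (if (old : Int) < shift then (n : Int) - shift + (old : Int) else (old : Int) - shift)
      (h2l.getD old 0))
    (List.range n) init init) ?_
  rw [Prod.mk.injEq]
  exact ⟨hB1.symm, hA2⟩
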